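-- pv_equiv track=rewrite | github.com/0726hayate/Refactoring-detection | langchain_pipeline/intra_method_signals.py | _pair_lines
-- ===== SOURCE A (Python) =====
-- from typing import Dict, List, Tuple
--
-- def _pair_lines(hunk: List[Tuple[str, str]]) -> List[Tuple[str, str]]:
--     """Greedy pairing of - and + lines that look like edits of each other.
--
--     Walk the hunk; when a '-' is followed (with possibly more -'s, then +'s),
--     pair them positionally up to the shorter run length. Crude but matches the
--     common case where one - line maps to one + line.
--     """
--     pairs: List[Tuple[str, str]] = []
--     i = 0
--     n = len(hunk)
--     while i < n:
--         if hunk[i][0] == "-":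
--             j = i
--             minus = []
--             while j < n and hunk[j][0] == "-":
--                 minus.append(hunk[j][1]); j += 1
--             plus = []
--             while j < n and hunk[j][0] == "+":
--                 plus.append(hunk[j][1]); j += 1
--             for k in range(min(len(minus), len(plus))):
--                 pairs.append((minus[k], plus[k]))
--             i = j
--         else:
--             i += 1
--     return pairs
-- ===== SOURCE B (Python) =====
-- from itertools import groupby
-- from typing import List, Tuple
--
-- def _pair_lines(hunk: List[Tuple[str, str]]) -> List[Tuple[str, str]]:
--     """Group the hunk into runs of equal tags, then pair each '-' run with an
--     immediately following '+' run positionally (zip truncates to the shorter)."""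
--     runs = [(tag, [content for _, content in grp])
--             for tag, grp in groupby(hunk, key=lambda x: x[0])]
--     pairs: List[Tuple[str, str]] = []
--     i = 0
--     while i < len(runs):
--         if runs[i][0] == "-" and i + 1 < len(runs) and runs[i + 1][0] == "+":
--             pairs.extend(zip(runs[i][1], runs[i + 1][1]))
--             i += 2
--         else:
--             i += 1
--     return pairs
-- ===== Notes on version B (the rewrite author's own statement) =====
-- stated objective: idiomatic
-- what changed: B first groups the hunk into (tag, contents) runs with itertools.groupby, then scans the run list with a one-run lookahead, zipping each '-' run with an immediately following '+' run, instead of A's index-walking while loops with manual run collection.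
import Mathlib
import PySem

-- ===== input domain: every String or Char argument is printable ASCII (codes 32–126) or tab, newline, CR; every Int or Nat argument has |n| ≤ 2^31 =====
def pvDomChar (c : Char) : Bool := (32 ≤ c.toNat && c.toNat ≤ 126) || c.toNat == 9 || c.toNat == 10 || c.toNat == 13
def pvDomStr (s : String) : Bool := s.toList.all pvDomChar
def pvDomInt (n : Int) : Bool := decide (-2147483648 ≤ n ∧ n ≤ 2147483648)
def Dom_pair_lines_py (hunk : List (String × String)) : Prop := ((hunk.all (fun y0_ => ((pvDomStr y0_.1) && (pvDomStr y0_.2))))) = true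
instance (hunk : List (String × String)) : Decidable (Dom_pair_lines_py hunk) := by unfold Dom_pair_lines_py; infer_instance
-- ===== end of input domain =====

-- B re-implements A's index-walking pairing by first grouping the hunk into (tag, contents)
-- runs, then pairing each '-' run with an immediately following '+' run via zip (objective: idiomatic).

-- ===== PORT A =====
-- inner 'while j < n and hunk[j][0] == tag' loop of A: returns (collected contents, final j)
def pvRunWhile (hunk : List (String × String)) (tag : String) (j : Nat) : List String × Nat :=
  if h : j < hunk.length then
    if hunk[j].1 = tag then
      let r := pvRunWhile hunk tag (j + 1)
      (hunk[j].2 :: r.1, r.2)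
    else ([], j)
  else ([], j)
termination_by hunk.length - j

-- termination helper for the outer while loop: j never moves backwards
theorem pvRunWhile_ge (hunk : List (String × String)) (tag : String) (j : Nat) :
    j ≤ (pvRunWhile hunk tag j).2 := by
  rw [pvRunWhile]
  split
  · split
    · have := pvRunWhile_ge hunk tag (j + 1)
      simpa using Nat.le_of_succ_le this
    · simp
  · simp
termination_by hunk.length - j

-- outer 'while i < n' loop of A
def pvMainLoop (hunk : List (String × String)) (i : Nat) : List (String × String) :=
  if h : i < hunk.length then
    if ht : hunk[i].1 = "-" then
      let m := pvRunWhile hunk "-" i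
      let p := pvRunWhile hunk "+" m.2
      -- 'for k in range(min(len(minus), len(plus))): pairs.append(...)'; indices are in range
      ((List.range (min m.1.length p.1.length)).map
        (fun k => (m.1.getD k "", p.1.getD k ""))) ++ pvMainLoop hunk p.2
    else pvMainLoop hunk (i + 1)
  else []
termination_by hunk.length - i
decreasing_by
  · have h1 : i + 1 ≤ (pvRunWhile hunk "-" i).2 := by
      rw [pvRunWhile]; simp only [h, ht, dite_true, if_true]
      exact Nat.succ_le_of_lt (Nat.lt_of_lt_of_le (Nat.lt_succ_self i) (pvRunWhile_ge hunk "-" (i + 1)))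
    have h2 := pvRunWhile_ge hunk "+" (pvRunWhile hunk "-" i).2
    omega
  · omega

def pair_lines_py (hunk : List (String × String)) : List (String × String) :=
  pvMainLoop hunk 0

-- ===== PORT B =====
-- itertools.groupby(hunk, key=first) rendered as runs of equal tags
def pvGroupRuns : List (String × String) → List (String × List String)
  | [] => []
  | (t, c) :: rest =>
    (t, c :: (rest.takeWhile (fun p => p.1 = t)).map Prod.snd) ::
      pvGroupRuns (rest.dropWhile (fun p => p.1 = t))
termination_by l => l.length
decreasing_by
  exact Nat.lt_succ_of_le (List.length_dropWhile_le _ _)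

-- B's index loop over the run list, with a two-run lookahead
def pvPairRuns : List (String × List String) → List (String × String)
  | (t, cs) :: (t', cs') :: rest =>
      if t = "-" ∧ t' = "+" then cs.zip cs' ++ pvPairRuns rest
      else pvPairRuns ((t', cs') :: rest)
  | _ => []

def pair_lines_py_alt (hunk : List (String × String)) : List (String × String) :=
  pvPairRuns (pvGroupRuns hunk)

-- ===== PRECONDITION & SPEC =====
def Spec_pair_lines_py (hunk : List (String × String)) (out : List (String × String)) : Prop := out = pair_lines_py_alt hunk
instance (hunk : List (String × String)) (out : List (String × String)) : Decidable (Spec_pair_lines_py hunk out) := by unfold Spec_pair_lines_py; infer_instance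

-- ===== CLAIM (what is proved, stated in full; the proofs are below) =====
def Claim_equal_pair_lines_py : Prop := ∀ (hunk : List (String × String)), Dom_pair_lines_py hunk → Spec_pair_lines_py hunk (pair_lines_py hunk)

-- ===== LEMMAS AND PROOFS =====

theorem dropWhile_eq_drop_takeWhile {α : Type} (p : α → Bool) (l : List α) :
    l.dropWhile p = l.drop (l.takeWhile p).length := by
  induction l with
  | nil => rfl
  | cons a l ih =>
    by_cases h : p a
    · simp [h, ih]
    · simp [h]

-- characterisation of A's inner loop via takeWhile on the suffix
theorem pvRunWhile_eq (hunk : List (String × String)) (tag : String) (j : Nat) :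
    pvRunWhile hunk tag j =
      (((hunk.drop j).takeWhile (fun p => p.1 = tag)).map Prod.snd,
        j + ((hunk.drop j).takeWhile (fun p => p.1 = tag)).length) := by
  induction j using pvRunWhile.induct hunk tag with
  | case1 x h ht ih =>
    have hd : hunk.drop x = hunk[x] :: hunk.drop (x + 1) := List.drop_eq_getElem_cons h
    rw [pvRunWhile, dif_pos h, if_pos ht, ih, hd, List.takeWhile_cons]
    simp only [ht, decide_true, if_true, List.map_cons, List.length_cons, Prod.mk.injEq]
    exact ⟨trivial, by omega⟩
  | case2 x h ht =>
    have hd : hunk.drop x = hunk[x] :: hunk.drop (x + 1) := List.drop_eq_getElem_cons h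
    rw [pvRunWhile, dif_pos h, if_neg ht, hd, List.takeWhile_cons]
    simp [ht]
  | case3 x h =>
    rw [pvRunWhile, dif_neg h, List.drop_eq_nil_iff.mpr (Nat.le_of_not_lt h)]
    simp

-- the range/min indexing loop of A is zip
theorem range_min_getD_eq_zip (a b : List String) :
    (List.range (min a.length b.length)).map (fun k => (a.getD k "", b.getD k "")) = a.zip b := by
  induction a generalizing b with
  | nil => simp
  | cons x a ih =>
    cases b with
    | nil => simp
    | cons y b =>
      have hmin : min (x :: a).length (y :: b).length = (min a.length b.length) + 1 := by
        simp [Nat.succ_min_succ]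
      rw [hmin, List.range_succ_eq_map]
      simp only [List.map_cons, List.map_map, Function.comp_def, List.getD_cons_zero,
        List.getD_cons_succ, List.zip_cons_cons, List.cons.injEq]
      exact ⟨trivial, ih b⟩

-- skipping a non-'-' head run changes nothing in B's pairing
theorem pvPairRuns_cons_ne (t : String) (cs : List String) (X : List (String × List String))
    (h : t ≠ "-") : pvPairRuns ((t, cs) :: X) = pvPairRuns X := by
  cases X with
  | nil => rfl
  | cons y ys =>
    obtain ⟨t', cs'⟩ := y
    rw [pvPairRuns]
    simp [h]

theorem pairRuns_groupRuns_dropWhile (t : String) (l : List (String × String)) (h : t ≠ "-") :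
    pvPairRuns (pvGroupRuns (l.dropWhile (fun p => p.1 = t))) = pvPairRuns (pvGroupRuns l) := by
  cases l with
  | nil => rfl
  | cons a l =>
    obtain ⟨t2, c2⟩ := a
    rw [List.dropWhile_cons]
    split_ifs with h2
    · simp only [decide_eq_true_eq] at h2
      rw [pvGroupRuns, pvPairRuns_cons_ne _ _ _ (h2 ▸ h)]
      rw [h2]
    · rfl

-- skipping a non-'-' head element of the hunk changes nothing in B's result
theorem pairRuns_groupRuns_skip (t : String) (c : String) (rest : List (String × String))
    (h : t ≠ "-") :
    pvPairRuns (pvGroupRuns ((t, c) :: rest)) = pvPairRuns (pvGroupRuns rest) := by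
  rw [pvGroupRuns, pvPairRuns_cons_ne _ _ _ h, pairRuns_groupRuns_dropWhile t rest h]

-- the main invariant: A's outer loop from index i computes B's answer on the suffix
theorem pvMainLoop_eq (hunk : List (String × String)) (i : Nat) :
    pvMainLoop hunk i = pvPairRuns (pvGroupRuns (hunk.drop i)) := by
  induction i using pvMainLoop.induct hunk with
  | case1 x h ht m p ih =>
    rcases e : hunk[x] with ⟨t, c⟩
    have ht2 : t = "-" := by have h2 := ht; rw [e] at h2; exact h2
    subst ht2
    have hd : hunk.drop x = ("-", c) :: hunk.drop (x + 1) := by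
      rw [List.drop_eq_getElem_cons h, e]
    -- A's first inner loop: the '-' run starting at x
    have hm : pvRunWhile hunk "-" x =
        (c :: ((hunk.drop (x + 1)).takeWhile (fun p => p.1 = "-")).map Prod.snd,
          (x + 1) + ((hunk.drop (x + 1)).takeWhile (fun p => p.1 = "-")).length) := by
      rw [pvRunWhile_eq, hd, List.takeWhile_cons]
      simp only [decide_true, if_true, List.map_cons, List.length_cons, Prod.mk.injEq]
      exact ⟨trivial, by omega⟩
    -- the suffix after the '-' run
    have hdm : hunk.drop (pvRunWhile hunk "-" x).2 =
        (hunk.drop (x + 1)).dropWhile (fun p => p.1 = "-") := by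
      rw [hm, dropWhile_eq_drop_takeWhile, ← List.drop_drop, List.drop_drop]
    have ih' : pvMainLoop hunk (pvRunWhile hunk "+" (pvRunWhile hunk "-" x).2).2 =
        pvPairRuns (pvGroupRuns (hunk.drop (pvRunWhile hunk "+" (pvRunWhile hunk "-" x).2).2)) := ih
    rw [pvMainLoop, dif_pos h, dif_pos ht]
    show (List.range (min (pvRunWhile hunk "-" x).1.length
            (pvRunWhile hunk "+" (pvRunWhile hunk "-" x).2).1.length)).map
          (fun k => ((pvRunWhile hunk "-" x).1.getD k "",
            (pvRunWhile hunk "+" (pvRunWhile hunk "-" x).2).1.getD k "")) ++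
        pvMainLoop hunk (pvRunWhile hunk "+" (pvRunWhile hunk "-" x).2).2 =
      pvPairRuns (pvGroupRuns (hunk.drop x))
    rw [range_min_getD_eq_zip, ih', hd, pvGroupRuns]
    -- case split on the suffix after the '-' run
    cases hd1 : (hunk.drop (x + 1)).dropWhile (fun p => p.1 = "-") with
    | nil =>
      have hp : pvRunWhile hunk "+" (pvRunWhile hunk "-" x).2 =
          ([], (pvRunWhile hunk "-" x).2) := by
        rw [pvRunWhile_eq, hdm, hd1]; simp
      rw [hp, hdm, hd1]
      simp [hm, pvGroupRuns, pvPairRuns]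
    | cons a rest1 =>
      rcases a with ⟨t', c'⟩
      by_cases hq : t' = "+"
      · subst hq
        have hp : pvRunWhile hunk "+" (pvRunWhile hunk "-" x).2 =
            (c' :: (rest1.takeWhile (fun p => p.1 = "+")).map Prod.snd,
              (pvRunWhile hunk "-" x).2 + (1 + (rest1.takeWhile (fun p => p.1 = "+")).length)) := by
          rw [pvRunWhile_eq, hdm, hd1, List.takeWhile_cons]
          simp only [decide_true, if_true, List.map_cons, List.length_cons, Prod.mk.injEq]
          exact ⟨trivial, by omega⟩
        have hdp : hunk.drop (pvRunWhile hunk "+" (pvRunWhile hunk "-" x).2).2 =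
            rest1.dropWhile (fun p => p.1 = "+") := by
          rw [hp]
          rw [← List.drop_drop, hdm, hd1]
          rw [Nat.add_comm 1, List.drop_succ_cons, dropWhile_eq_drop_takeWhile]
        rw [hdp, pvGroupRuns, pvPairRuns]
        rw [hm] at hp
        rw [hm, hp]
        simp
      · have hp : pvRunWhile hunk "+" (pvRunWhile hunk "-" x).2 =
            ([], (pvRunWhile hunk "-" x).2) := by
          rw [pvRunWhile_eq, hdm, hd1, List.takeWhile_cons]
          simp [hq]
        rw [hp, hdm, hd1, pvGroupRuns, pvPairRuns]
        simp [hq, hm]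
  | case2 x h ht ih =>
    rcases e : hunk[x] with ⟨t, c⟩
    have ht' : t ≠ "-" := fun hh => ht (by rw [e, hh])
    have hd : hunk.drop x = (t, c) :: hunk.drop (x + 1) := by
      rw [List.drop_eq_getElem_cons h, e]
    rw [pvMainLoop, dif_pos h, dif_neg ht, ih, hd, pairRuns_groupRuns_skip t c _ ht']
  | case3 x h =>
    rw [pvMainLoop, dif_neg h, List.drop_eq_nil_iff.mpr (Nat.le_of_not_lt h), pvGroupRuns]
    rfl

theorem pair_lines_py_spec : Claim_equal_pair_lines_py := by
  intro hunk _
  unfold Spec_pair_lines_py pair_lines_py pair_lines_py_alt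
  simpa using pvMainLoop_eq hunk 0
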